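-- pv_equiv track=rewrite | github.com/JackCrawfordRobertson/Next-Gig-Prod | backend/fetch/unjobs.py | location_matches
-- ===== SOURCE A (Python) =====
-- LOCATION_ALIASES = {
--     "uk": ["united kingdom", "britain", "england", "scotland", "wales", "northern ireland"],
--     "london": ["greater london"],
--     "remote": ["work from home", "wfh", "telecommute", "telework", "virtual", "home-based"],
-- }
--
-- def location_matches(job_text, target_locations):
--     """Check if job matches any of the target locations"""
--     job_text = job_text.lower()
--
--     for location in target_locations:
--         loc_lower = location.lower()
--
--         # Direct match
--         if loc_lower in job_text:
--             return True
--
--         # Check aliases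
--         for alias in LOCATION_ALIASES.get(loc_lower, []):
--             if alias in job_text:
--                 return True
--
--     return False
-- ===== SOURCE B (Python) =====
-- LOCATION_ALIASES = {
--     "uk": ["united kingdom", "britain", "england", "scotland", "wales", "northern ireland"],
--     "london": ["greater london"],
--     "remote": ["work from home", "wfh", "telecommute", "telework", "virtual", "home-based"],
-- }
--
-- def location_matches(job_text, target_locations):
--     """Check if job matches any of the target locations"""
--     text = job_text.lower()
--     # stage 1: flatten every target and its aliases into one needle list
--     needles = []
--     for loc in target_locations:
--         l = loc.lower()
--         needles += [l] + LOCATION_ALIASES.get(l, [])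
--     # an empty needle matches any text; the positional scan below cannot see it
--     if "" in needles:
--         return True
--     # stage 2: bucket the needles by their first character
--     index = {}
--     for n in needles:
--         index.setdefault(n[0], []).append(n)
--     # stage 3: ONE left-to-right pass over the text; at each position only the
--     # needles whose first character is the current character are tried
--     for i, ch in enumerate(text):
--         for n in index.get(ch, []):
--             if text.startswith(n, i):
--                 return True
--     return False
-- ===== Notes on version B (the rewrite author's own statement) =====
-- stated objective: alternative
-- what changed: B inverts the scan direction: instead of A's needle-driven nested loops running one full substring search over the text per target/alias, B flattens all needles once, buckets them by first character into a dict, and makes a single left-to-right pass over the text, at each position trying only the needles whose first character matches (with an explicit guard for the empty needle).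
import Mathlib
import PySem

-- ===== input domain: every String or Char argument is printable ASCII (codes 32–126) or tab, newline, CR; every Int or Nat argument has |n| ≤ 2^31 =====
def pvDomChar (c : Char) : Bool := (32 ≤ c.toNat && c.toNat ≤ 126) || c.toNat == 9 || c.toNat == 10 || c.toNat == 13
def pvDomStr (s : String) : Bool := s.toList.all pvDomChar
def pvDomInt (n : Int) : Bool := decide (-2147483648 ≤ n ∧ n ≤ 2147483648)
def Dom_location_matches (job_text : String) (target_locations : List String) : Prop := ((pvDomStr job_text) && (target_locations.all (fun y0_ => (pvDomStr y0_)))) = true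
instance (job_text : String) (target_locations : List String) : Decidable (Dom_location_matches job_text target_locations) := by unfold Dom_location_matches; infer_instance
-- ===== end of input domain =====

-- B replaces A's needle-driven nested substring searches by a text-driven scan: flatten all
-- needles, bucket them by first character in a dict, then one left-to-right pass over the text
-- trying at each position only the needles whose first character matches (objective: alternative).

-- ===== PORT A =====
-- the module constant LOCATION_ALIASES (dict[str, list[str]] → association list), shared by both ports
def LOCATION_ALIASES : PySem.Dict String (List String) :=
  PySem.Dict.ofList [("uk", ["united kingdom", "britain", "england", "scotland", "wales", "northern ireland"]),
   ("london", ["greater london"]),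
   ("remote", ["work from home", "wfh", "telecommute", "telework", "virtual", "home-based"])]

-- inner 'for alias in …: if alias in job_text: return True'
def pvAliasLoopA (job_text : String) (aliases : List String) : Bool :=
  match aliases with
  | [] => false
  | a :: rest => if PySem.Str.isIn a job_text then true else pvAliasLoopA job_text rest

-- outer 'for location in target_locations: …' with its early returns
def pvLocLoopA (job_text : String) (locs : List String) : Bool :=
  match locs with
  | [] => false
  | loc :: rest =>
    let loc_lower := PySem.Str.lower loc
    if PySem.Str.isIn loc_lower job_text then true
    else if pvAliasLoopA job_text (PySem.Dict.getD LOCATION_ALIASES loc_lower []) then true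
    else pvLocLoopA job_text rest

def location_matches (job_text : String) (target_locations : List String) : Bool :=
  pvLocLoopA (PySem.Str.lower job_text) target_locations

-- ===== PORT B =====
-- stage-3 scan: 'for i, ch in enumerate(text): for n in index.get(ch, []): if text.startswith(n, i)';
-- the recursion carries the suffix text[i:] (= ch :: rest), so text.startswith(n, i) is
-- PySem.Chars.startswith on that suffix (exact: startswith with a start offset IS a prefix test on the suffix)
def pvScanB (index : PySem.Dict Char (List String)) : List Char → Bool
  | [] => false
  | ch :: rest =>
    if (PySem.Dict.getD index ch []).any (fun n => PySem.Chars.startswith (ch :: rest) n.toList) then true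
    else pvScanB index rest

def location_matches_alt (job_text : String) (target_locations : List String) : Bool :=
  let text := PySem.Str.lower job_text
  -- stage 1: 'needles += [l] + LOCATION_ALIASES.get(l, [])'
  let needles := target_locations.foldl (fun acc loc =>
    acc ++ (PySem.Str.lower loc :: PySem.Dict.getD LOCATION_ALIASES (PySem.Str.lower loc) [])) []
  if needles.any (· == "") then true
  else
    -- stage 2: 'index.setdefault(n[0], []).append(n)' (n is nonempty here, so n[0] = headD)
    let index := needles.foldl (fun d n => PySem.Dict.modify d (n.toList.headD ' ') [] (· ++ [n])) PySem.Dict.empty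
    pvScanB index text.toList

-- ===== PRECONDITION & SPEC =====
def Spec_location_matches (job_text : String) (target_locations : List String) (out : Bool) : Prop := out = location_matches_alt job_text target_locations
instance (job_text : String) (target_locations : List String) (out : Bool) : Decidable (Spec_location_matches job_text target_locations out) := by unfold Spec_location_matches; infer_instance

-- ===== CLAIM (what is proved, stated in full; the proofs are below) =====
def Claim_equal_location_matches : Prop := ∀ (job_text : String) (target_locations : List String), Dom_location_matches job_text target_locations → Spec_location_matches job_text target_locations (location_matches job_text target_locations)

-- ===== LEMMAS AND PROOFS =====

-- A's inner loop is an 'any' over the aliases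
theorem pvAliasLoopA_eq_any (t : String) (as : List String) :
    pvAliasLoopA t as = as.any (fun a => PySem.Str.isIn a t) := by
  induction as with
  | nil => rfl
  | cons a rest ih =>
    rw [pvAliasLoopA, List.any_cons, ih]
    cases PySem.Str.isIn a t <;> simp

-- A's outer loop is an 'any' over the flattened needle list
theorem pvLocLoopA_eq_any (t : String) (locs : List String) :
    pvLocLoopA t locs =
      (locs.flatMap (fun loc =>
        PySem.Str.lower loc :: PySem.Dict.getD LOCATION_ALIASES (PySem.Str.lower loc) [])).any
        (fun n => PySem.Str.isIn n t) := by
  induction locs with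
  | nil => rfl
  | cons loc rest ih =>
    rw [pvLocLoopA]
    simp only [pvAliasLoopA_eq_any, ih, List.flatMap_cons, List.any_append, List.any_cons]
    cases h1 : PySem.Str.isIn (PySem.Str.lower loc) t <;>
      cases h2 : (PySem.Dict.getD LOCATION_ALIASES (PySem.Str.lower loc) []).any
          (fun a => PySem.Str.isIn a t) <;>
        simp [*]

-- B's stage-2 index: each bucket c holds exactly the needles whose first character is c
theorem pvIndexB_getD (N : List String) (c : Char) :
    PySem.Dict.getD
        (N.foldl (fun d n => PySem.Dict.modify d (n.toList.headD ' ') [] (· ++ [n])) PySem.Dict.empty)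
        c []
      = N.filter (fun n => n.toList.headD ' ' == c) := by
  have h := PySem.Dict.getD_foldl_modify_append
    (l := N.map (fun n => (n.toList.headD ' ', n))) (d := PySem.Dict.empty) (c := c)
  rw [List.foldl_map] at h
  simpa [List.filter_map, Function.comp_def] using h

-- B's scan finds exactly the nonempty needles occurring in the text
theorem pvScanB_eq_any (N : List String) (index : PySem.Dict Char (List String))
    (hne : ∀ n ∈ N, n ≠ "")
    (hidx : ∀ c, PySem.Dict.getD index c [] = N.filter (fun n => n.toList.headD ' ' == c))
    (s : List Char) :
    pvScanB index s = N.any (fun n => PySem.Chars.isIn n.toList s) := by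
  induction s with
  | nil =>
    rw [pvScanB]
    symm
    refine List.any_eq_false.mpr (fun n hn h => ?_)
    rw [PySem.Chars.isIn_iff_infix] at h
    exact hne n hn (String.toList_eq_nil_iff.mp (List.eq_nil_of_infix_nil h))
  | cons ch rest ih =>
    rw [pvScanB]
    have hstep : ((PySem.Dict.getD index ch []).any
          (fun n => PySem.Chars.startswith (ch :: rest) n.toList)
        || N.any (fun n => PySem.Chars.isIn n.toList rest))
        = N.any (fun n => PySem.Chars.isIn n.toList (ch :: rest)) := by
      rw [hidx, Bool.eq_iff_iff]
      simp only [Bool.or_eq_true, List.any_eq_true, List.mem_filter,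
        PySem.Chars.startswith_iff, PySem.Chars.isIn_iff_infix, beq_iff_eq]
      constructor
      · rintro (⟨n, ⟨hn, hhd⟩, hpre⟩ | ⟨n, hn, hinf⟩)
        · exact ⟨n, hn, hpre.isInfix⟩
        · exact ⟨n, hn, List.infix_cons hinf⟩
      · rintro ⟨n, hn, hinf⟩
        rcases List.infix_cons_iff.mp hinf with hpre | hinf'
        · left
          refine ⟨n, ⟨hn, ?_⟩, hpre⟩
          have hnil : n.toList ≠ [] := by
            intro h0; exact hne n hn (String.toList_eq_nil_iff.mp h0)
          rcases hpre with ⟨t, ht⟩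
          cases hcs : n.toList with
          | nil => exact absurd hcs hnil
          | cons c' cs => rw [hcs] at ht; simp at ht; simp [ht.1]
        · right; exact ⟨n, hn, hinf'⟩
    split_ifs with h
    · rw [← hstep, h, Bool.true_or]
    · have h' := Bool.not_eq_true _ |>.mp h
      rw [ih, ← hstep, h', Bool.false_or]

-- a needle list with a cons-shaped flatMap (shared by the rewrites of both sides)
theorem pvNeedles_eq_flatMap (locs : List String) :
    locs.foldl (fun acc loc =>
        acc ++ (PySem.Str.lower loc :: PySem.Dict.getD LOCATION_ALIASES (PySem.Str.lower loc) [])) []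
      = locs.flatMap (fun loc =>
          PySem.Str.lower loc :: PySem.Dict.getD LOCATION_ALIASES (PySem.Str.lower loc) []) := by
  simpa using PySem.List.foldl_append_eq_flatMap
    (g := fun loc => PySem.Str.lower loc :: PySem.Dict.getD LOCATION_ALIASES (PySem.Str.lower loc) [])
    (l := locs) (acc := [])

-- ===== VERDICT (by name: the statement is the Claim_ definition above) =====
theorem location_matches_spec : Claim_equal_location_matches := by
  intro job_text target_locations _
  unfold Spec_location_matches location_matches location_matches_alt
  rw [pvLocLoopA_eq_any, pvNeedles_eq_flatMap]
  set N := target_locations.flatMap (fun loc =>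
    PySem.Str.lower loc :: PySem.Dict.getD LOCATION_ALIASES (PySem.Str.lower loc) []) with hN
  by_cases hE : N.any (· == "") = true
  · -- an empty needle: both sides are true
    simp only [hE, if_true]
    rcases List.any_eq_true.mp hE with ⟨n, hn, hn0⟩
    have : PySem.Str.isIn n (PySem.Str.lower job_text) = true := by
      have : n = "" := by simpa using hn0
      subst this
      simp
    exact List.any_eq_true.mpr ⟨n, hn, this⟩
  · simp only [hE]
    rw [pvScanB_eq_any N _
      (fun n hn h0 => hE (List.any_eq_true.mpr ⟨n, hn, by simp [h0]⟩))
      (fun c => pvIndexB_getD N c)]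
    apply PySem.List.any_congr_mem
    intro n _
    simp
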